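-- pv_equiv track=rewrite | github.com/dcossios/WorkflowGenerator | Agent Generator/validation/validate_workflow.py | _validate_trigger_nodes
-- ===== SOURCE A (Python) =====
-- from typing import Dict, List, Any, Optional, Tuple
--
-- def _validate_trigger_nodes(workflow: Dict[str, Any]) -> List[str]:
--     """Validate trigger node requirements."""
--     errors = []
--
--     trigger_types = {
--         'n8n-nodes-base.manualTrigger',
--         'n8n-nodes-base.webhook',
--         'n8n-nodes-base.scheduleTrigger',
--         'n8n-nodes-base.chatTrigger',
--         'n8n-nodes-base.emailTrigger'
--     }
--
--     nodes = workflow.get('nodes', [])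
--     trigger_nodes = [node for node in nodes if node.get('type') in trigger_types]
--
--     if not trigger_nodes:
--         errors.append("Workflow must have at least one trigger node")
--
--     # Check for multiple manual triggers (usually not recommended)
--     manual_triggers = [
--         node for node in trigger_nodes
--         if node.get('type') == 'n8n-nodes-base.manualTrigger'
--     ]
--     if len(manual_triggers) > 1:
--         errors.append("Multiple manual trigger nodes found - consider using only one")
--
--     return errors
-- ===== SOURCE B (Python) =====
-- def _validate_trigger_nodes(workflow):
--     """Validate trigger node requirements via a type-frequency index."""
--     counts = {}
--     for node in workflow.get('nodes', []):
--         t = node.get('type')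
--         counts[t] = counts.get(t, 0) + 1
--
--     trigger_types = (
--         'n8n-nodes-base.manualTrigger',
--         'n8n-nodes-base.webhook',
--         'n8n-nodes-base.scheduleTrigger',
--         'n8n-nodes-base.chatTrigger',
--         'n8n-nodes-base.emailTrigger',
--     )
--
--     errors = []
--     if not any(counts.get(t, 0) for t in trigger_types):
--         errors.append("Workflow must have at least one trigger node")
--     if counts.get('n8n-nodes-base.manualTrigger', 0) > 1:
--         errors.append("Multiple manual trigger nodes found - consider using only one")
--     return errors
-- ===== Notes on version B (the rewrite author's own statement) =====
-- stated objective: alternative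
-- what changed: Instead of filtering the node list twice, B builds a frequency dictionary of node types in one pass and then answers both checks by five dictionary lookups (any nonzero trigger-type count; manual-trigger count > 1), so no node list is ever filtered.
import Mathlib
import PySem

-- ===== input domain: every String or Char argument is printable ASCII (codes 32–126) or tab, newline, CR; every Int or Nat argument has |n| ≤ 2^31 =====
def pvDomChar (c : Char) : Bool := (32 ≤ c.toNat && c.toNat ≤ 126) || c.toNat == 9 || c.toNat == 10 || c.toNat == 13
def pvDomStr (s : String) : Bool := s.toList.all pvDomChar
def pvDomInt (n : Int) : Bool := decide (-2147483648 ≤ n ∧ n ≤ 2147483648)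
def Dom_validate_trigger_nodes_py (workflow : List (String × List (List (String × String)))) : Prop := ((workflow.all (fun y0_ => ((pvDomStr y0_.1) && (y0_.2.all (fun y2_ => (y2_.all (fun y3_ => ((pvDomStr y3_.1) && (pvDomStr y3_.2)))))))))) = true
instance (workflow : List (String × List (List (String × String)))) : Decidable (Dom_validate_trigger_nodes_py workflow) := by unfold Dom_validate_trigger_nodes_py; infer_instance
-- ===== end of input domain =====

-- B replaces A's two list filterings by a type-frequency dictionary built in one pass,
-- answering both checks by dictionary lookups (objective: alternative).

-- ===== PORT A =====
-- shared with B: dict.get as first-match association-list lookup (the fixed convention), and the literal trigger-type set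
def pvLookup? {V : Type} (d : List (String × V)) (k : String) : Option V :=
  (d.find? (fun p => p.1 == k)).map (·.2)

def pvTriggerTypes : List String :=
  ["n8n-nodes-base.manualTrigger", "n8n-nodes-base.webhook", "n8n-nodes-base.scheduleTrigger",
   "n8n-nodes-base.chatTrigger", "n8n-nodes-base.emailTrigger"]

-- node.get('type') in trigger_types  (None is in no set)
def pvIsTrigger (node : List (String × String)) : Bool :=
  match pvLookup? node "type" with
  | some t => pvTriggerTypes.contains t
  | none => false

-- node.get('type') == 'n8n-nodes-base.manualTrigger'  (None == str is False)
def pvIsManual (node : List (String × String)) : Bool :=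
  pvLookup? node "type" == some "n8n-nodes-base.manualTrigger"

def validate_trigger_nodes_py (workflow : List (String × List (List (String × String)))) : List String :=
  let nodes := (pvLookup? workflow "nodes").getD []
  let trigger_nodes := nodes.filter pvIsTrigger
  let errors := if trigger_nodes = [] then ["Workflow must have at least one trigger node"] else []
  let manual_triggers := trigger_nodes.filter pvIsManual
  if manual_triggers.length > 1 then
    errors ++ ["Multiple manual trigger nodes found - consider using only one"]
  else errors

-- ===== PORT B =====
-- counts = {}; for node in nodes: counts[node.get('type')] = counts.get(node.get('type'), 0) + 1
-- (key type Option String: node.get('type') may be None)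
def pvTypeCounts (nodes : List (List (String × String))) : PySem.Dict (Option String) Int :=
  nodes.foldl (fun d node => d.modify (pvLookup? node "type") 0 (· + 1)) PySem.Dict.empty

def validate_trigger_nodes_py_alt (workflow : List (String × List (List (String × String)))) : List String :=
  let nodes := (pvLookup? workflow "nodes").getD []
  let counts := pvTypeCounts nodes
  -- any(counts.get(t, 0) for t in trigger_types): a Python int is truthy iff nonzero
  let errors := if pvTriggerTypes.any (fun t => counts.getD (some t) 0 != 0) then []
                else ["Workflow must have at least one trigger node"]
  if counts.getD (some "n8n-nodes-base.manualTrigger") 0 > 1 then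
    errors ++ ["Multiple manual trigger nodes found - consider using only one"]
  else errors

-- ===== PRECONDITION & SPEC =====
def Spec_validate_trigger_nodes_py (workflow : List (String × List (List (String × String)))) (out : List String) : Prop := out = validate_trigger_nodes_py_alt workflow
instance (workflow : List (String × List (List (String × String)))) (out : List String) : Decidable (Spec_validate_trigger_nodes_py workflow out) := by unfold Spec_validate_trigger_nodes_py; infer_instance

-- ===== CLAIM =====
def Claim_equal_validate_trigger_nodes_py : Prop := ∀ (workflow : List (String × List (List (String × String)))), Dom_validate_trigger_nodes_py workflow → Spec_validate_trigger_nodes_py workflow (validate_trigger_nodes_py workflow)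

-- ===== LEMMAS AND PROOFS =====
-- B's dictionary lookup for a type t is the number of nodes whose 'type' is t
lemma pvTypeCounts_getD (nodes : List (List (String × String))) (t : String) :
    (pvTypeCounts nodes).getD (some t) 0 =
      ((nodes.countP (fun n => pvLookup? n "type" == some t) : Nat) : Int) := by
  unfold pvTypeCounts
  have h := PySem.Dict.getD_foldl_modify_add_one
      (l := nodes.map (fun n => pvLookup? n "type")) (d := PySem.Dict.empty) (v := some t)
  rw [List.foldl_map] at h
  rw [h]
  simp [List.count_eq_countP, List.countP_map, Function.comp_def]

lemma pvManual_isTrigger (node : List (String × String)) (h : pvIsManual node = true) :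
    pvIsTrigger node = true := by
  unfold pvIsManual at h
  unfold pvIsTrigger
  cases hg : pvLookup? node "type" with
  | none => simp [hg] at h
  | some t =>
      simp [hg] at h
      subst h
      decide

lemma pvFilter_manual (nodes : List (List (String × String))) :
    (nodes.filter pvIsTrigger).filter pvIsManual = nodes.filter pvIsManual := by
  rw [List.filter_filter]
  apply List.filter_congr
  intro n _
  by_cases hm : pvIsManual n = true
  · simp [hm, pvManual_isTrigger n hm]
  · simp [Bool.eq_false_iff.mpr hm]

-- the 'any' over the five counts is exactly 'some trigger node exists'
lemma pvAny_counts (nodes : List (List (String × String))) :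
    (pvTriggerTypes.any (fun t => (pvTypeCounts nodes).getD (some t) 0 != 0)) =
      !(nodes.filter pvIsTrigger).isEmpty := by
  simp only [pvTypeCounts_getD]
  rcases h : nodes.filter pvIsTrigger with _ | ⟨n, rest⟩
  · have hz : ∀ m ∈ nodes, pvIsTrigger m = false := by
      simpa using (List.filter_eq_nil_iff.mp h)
    simp only [List.isEmpty_nil, Bool.not_true]
    rw [List.any_eq_false]
    intro t ht
    have : nodes.countP (fun n => pvLookup? n "type" == some t) = 0 := by
      rw [List.countP_eq_zero]
      intro m hm hmt
      have := hz m hm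
      unfold pvIsTrigger at this
      cases hg : pvLookup? m "type" with
      | none => simp [hg] at hmt
      | some u =>
          simp [hg] at hmt this
          exact this (hmt ▸ ht)
    simp [this]
  · have hn : n ∈ nodes.filter pvIsTrigger := by rw [h]; exact List.mem_cons_self
    have hmem := List.mem_of_mem_filter hn
    have htr : pvIsTrigger n = true := List.of_mem_filter hn
    unfold pvIsTrigger at htr
    cases hg : pvLookup? n "type" with
    | none => simp [hg] at htr
    | some t =>
        simp [hg] at htr
        simp only [List.isEmpty_cons, Bool.not_false]
        rw [List.any_eq_true]
        refine ⟨t, by simpa using htr, ?_⟩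
        have : 0 < nodes.countP (fun m => pvLookup? m "type" == some t) := by
          rw [List.countP_pos_iff]
          exact ⟨n, hmem, by simp [hg]⟩
        simpa using (by omega : ¬ ((nodes.countP (fun m => pvLookup? m "type" == some t) : Nat) : Int) = 0)

-- ===== VERDICT =====
theorem validate_trigger_nodes_py_spec : Claim_equal_validate_trigger_nodes_py := by
  intro workflow _
  unfold Spec_validate_trigger_nodes_py validate_trigger_nodes_py validate_trigger_nodes_py_alt
  set nodes := (pvLookup? workflow "nodes").getD [] with hn
  have h2 : (((nodes.countP (fun n => pvLookup? n "type" == some "n8n-nodes-base.manualTrigger") : Nat) : Int) > 1)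
      ↔ ((nodes.filter pvIsManual).length > 1) := by
    rw [List.countP_eq_length_filter]
    constructor <;> intro h <;> exact_mod_cast h
  simp only [pvAny_counts, pvFilter_manual]
  simp only [pvTypeCounts_getD, h2]
  by_cases he : nodes.filter pvIsTrigger = []
  · simp [he]
  · simp [he]
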